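-- pv_equiv track=rewrite | github.com/tkddk0108/codingPrac | 프로그래머스/0/120956. 옹알이 （1）/옹알이 （1）.py | solution
-- ===== SOURCE A (Python) =====
-- from itertools import permutations
--
-- def solution(babbling):
--     answer = 0
--     ahri = ["aya", "ye", "woo", "ma"]
--     value = ''
--     for i in permutations(["aya", "ye", "woo", "ma"], 2):
--         value = ''
--         value += i[0] + i[1]
--         ahri.append(value)
--     for i in permutations(["aya", "ye", "woo", "ma"], 3):
--         value = ''
--         value += i[0] + i[1] + i[2]
--         ahri.append(value)
--     for i in permutations(["aya", "ye", "woo", "ma"], 4):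
--         value = ''
--         value += i[0] + i[1] + i[2] + i[3]
--         ahri.append(value)
--
--     for i in babbling:
--         if i in ahri:
--             answer += 1
--     return answer
-- ===== SOURCE B (Python) =====
-- def solution(babbling):
--     words = ("aya", "ye", "woo", "ma")
--     count = 0
--     for s in babbling:
--         used = set()
--         i = 0
--         ok = True
--         while i < len(s):
--             for w in words:
--                 if s.startswith(w, i) and w not in used:
--                     used.add(w)
--                     i += len(w)
--                     break
--             else:
--                 ok = False
--                 break
--         if ok and used:
--             count += 1
--     return count
-- ===== Notes on version B (the rewrite author's own statement) =====
-- stated objective: simpler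
-- what changed: Instead of precomputing the 64-element list of all concatenations of 1-4 distinct words and testing each babbling by list membership, B parses each babbling left-to-right, greedily consuming one of the four words at the cursor and tracking used words in a set; it counts the string iff the whole string is consumed and at least one word was used.
import Mathlib
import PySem

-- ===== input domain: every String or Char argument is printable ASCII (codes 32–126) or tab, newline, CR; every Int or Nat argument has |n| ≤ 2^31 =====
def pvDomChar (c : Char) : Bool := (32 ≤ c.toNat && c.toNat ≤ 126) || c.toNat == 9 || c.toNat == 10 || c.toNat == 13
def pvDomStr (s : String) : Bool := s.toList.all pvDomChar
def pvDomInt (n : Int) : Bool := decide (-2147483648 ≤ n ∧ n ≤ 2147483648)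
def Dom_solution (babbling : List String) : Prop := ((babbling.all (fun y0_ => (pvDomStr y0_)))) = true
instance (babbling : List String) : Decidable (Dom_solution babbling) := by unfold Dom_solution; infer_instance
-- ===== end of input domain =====

-- B replaces A's precomputed 64-string arrangement table by a greedy left-to-right prefix parse
-- of each babbling (the four words have distinct first letters, so no backtracking is needed);
-- objective: simpler — no table, one linear scan per string.

-- ===== PORT A =====
def pvWords : List String := ["aya", "ye", "woo", "ma"]

-- the list `ahri` A builds: the four words plus all concatenations of 2-, 3- and 4-permutations
def pvAhri : List String :=
  let a0 := pvWords
  let a1 := (PySem.List.permutations pvWords 2).foldl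
    (fun acc i => acc ++ ["" ++ (i.getD 0 "" ++ i.getD 1 "")]) a0
  let a2 := (PySem.List.permutations pvWords 3).foldl
    (fun acc i => acc ++ ["" ++ (i.getD 0 "" ++ i.getD 1 "" ++ i.getD 2 "")]) a1
  (PySem.List.permutations pvWords 4).foldl
    (fun acc i => acc ++ ["" ++ (i.getD 0 "" ++ i.getD 1 "" ++ i.getD 2 "" ++ i.getD 3 "")]) a2

def solution (babbling : List String) : Int :=
  babbling.foldl (fun answer i => if pvAhri.contains i then answer + 1 else answer) 0

-- ===== PORT B =====
-- Source B's while-loop over the cursor, as structural recursion on a fuel that starts at the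
-- string's length (each step consumes at least one character, so the fuel never runs out);
-- the inner for/break over the four words is List.find?; s.startswith(w, i) on the suffix
-- at the cursor is exactly isPrefixOf on the remaining characters.
def pvParse (fuel : Nat) (cs : List Char) (used : List String) : Option (List String) :=
  if cs.isEmpty then some used
  else
    match fuel with
    | 0 => none
    | fuel + 1 =>
      match pvWords.find? (fun w => w.toList.isPrefixOf cs && !used.contains w) with
      | none => none
      | some w => pvParse fuel (cs.drop w.toList.length) (used ++ [w])

-- `ok and used`: the parse reached the end and at least one word was consumed
def pvAccept (s : String) : Bool :=
  match pvParse s.toList.length s.toList [] with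
  | some used => !used.isEmpty
  | none => false

def solution_alt (babbling : List String) : Int :=
  babbling.foldl (fun count s => if pvAccept s then count + 1 else count) 0

-- ===== PRECONDITION & SPEC =====
def Spec_solution (babbling : List String) (out : Int) : Prop := out = solution_alt babbling
instance (babbling : List String) (out : Int) : Decidable (Spec_solution babbling out) := by unfold Spec_solution; infer_instance

-- ===== CLAIM (what is proved, stated in full; the proofs are below) =====
def Claim_equal_solution : Prop := ∀ (babbling : List String), Dom_solution babbling → Spec_solution babbling (solution babbling)

-- ===== LEMMAS AND PROOFS =====

-- a successful parse decomposes the input into distinct words of the four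
theorem pvParse_sound (fuel : Nat) (cs : List Char) (used : List String) (fin : List String)
    (h : pvParse fuel cs used = some fin) :
    ∃ ws, fin = used ++ ws ∧ (∀ w ∈ ws, w ∈ pvWords) ∧
      cs = (ws.map String.toList).flatten ∧ (used.Nodup → fin.Nodup) := by
  induction fuel generalizing cs used with
  | zero =>
      rw [pvParse] at h
      split at h
      · exact ⟨[], by simpa using (Option.some_inj.mp h).symm, by simp,
          by simp [List.isEmpty_iff.mp ‹_›], fun hn => by cases Option.some_inj.mp h; simpa using hn⟩
      · simp at h
  | succ fuel ih =>
      rw [pvParse] at h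
      split at h
      · exact ⟨[], by simpa using (Option.some_inj.mp h).symm, by simp,
          by simp [List.isEmpty_iff.mp ‹_›], fun hn => by cases Option.some_inj.mp h; simpa using hn⟩
      · rename_i hemp
        split at h
        · simp at h
        · rename_i w hf
          obtain ⟨ws', h1, h2, h3, h4⟩ := ih _ _ h
          have hpred := List.find?_some hf
          have hmem := List.mem_of_find?_eq_some hf
          simp only [Bool.and_eq_true, Bool.not_eq_true'] at hpred
          have hpre : w.toList <+: cs := List.isPrefixOf_iff_prefix.mp hpred.1
          obtain ⟨t, ht⟩ := hpre
          refine ⟨w :: ws', by simpa using h1, ?_, ?_, ?_⟩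
          · intro x hx
            rcases List.mem_cons.mp hx with rfl | hx
            · exact hmem
            · exact h2 _ hx
          · subst ht
            simp only [List.map_cons, List.flatten_cons]
            congr 1
            simpa [List.drop_left] using h3
          · intro hn
            apply h4
            have hwni : w ∉ used := by simpa using hpred.2
            simp [List.nodup_append, hn]
            exact fun a ha h => hwni (h ▸ ha)

-- all lists over the four words of length ≤ n
def pvSeqs : Nat → List (List String)
  | 0 => [[]]
  | n + 1 => [] :: pvWords.flatMap (fun w => (pvSeqs n).map (w :: ·))

theorem mem_pvSeqs (n : Nat) (ws : List String) (hlen : ws.length ≤ n)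
    (hsub : ∀ x ∈ ws, x ∈ pvWords) : ws ∈ pvSeqs n := by
  induction n generalizing ws with
  | zero => cases ws with
    | nil => simp [pvSeqs]
    | cons a t => simp at hlen
  | succ n ih =>
    cases ws with
    | nil => simp [pvSeqs]
    | cons a t =>
      have : t ∈ pvSeqs n := ih t (by simpa using hlen) (fun x hx => hsub x (List.mem_cons_of_mem _ hx))
      simp only [pvSeqs, List.mem_cons, List.mem_flatMap, List.mem_map]
      exact Or.inr ⟨a, hsub a List.mem_cons_self, t, this, rfl⟩

set_option maxRecDepth 10000 in
theorem enum_in_ahri : ∀ ws ∈ pvSeqs 4, ws.Nodup → ws ≠ [] →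
    pvAhri.contains (String.ofList ((ws.map String.toList).flatten)) = true := by decide

theorem ahri_accept : ∀ s ∈ pvAhri, pvAccept s = true := by decide

theorem contains_eq_accept (s : String) : pvAhri.contains s = pvAccept s := by
  cases hA : pvAccept s with
  | true =>
      unfold pvAccept at hA
      split at hA
      · rename_i ws hp
        obtain ⟨ws', h1, h2, h3, h4⟩ := pvParse_sound _ _ _ _ hp
        simp only [List.nil_append] at h1
        subst h1
        have hnd : ws.Nodup := h4 List.nodup_nil
        have hlen : ws.length ≤ 4 :=
          (List.Subperm.length_le (List.subperm_of_subset hnd (fun x hx => h2 x hx)))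
        have hne : ws ≠ [] := by
          intro h; subst h; simp at hA
        have := enum_in_ahri ws (mem_pvSeqs 4 ws hlen h2) hnd hne
        rwa [← h3, String.ofList_toList] at this
      · simp at hA
  | false =>
      by_contra hc
      have hmem : s ∈ pvAhri := by
        simpa [List.contains_iff_mem] using hc
      rw [ahri_accept s hmem] at hA
      cases hA

-- ===== VERDICT (by name: the statement is the Claim_ definition above) =====
theorem solution_spec : Claim_equal_solution := by
  intro babbling _
  unfold Spec_solution solution solution_alt
  have : (fun (answer : Int) (i : String) => if pvAhri.contains i then answer + 1 else answer)
       = (fun (count : Int) (s : String) => if pvAccept s then count + 1 else count) := by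
    funext a s
    rw [contains_eq_accept]
  rw [this]
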